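-- pv_equiv track=rewrite | github.com/fbuetler/adventofcode | 2024/10/solve.py | parse
-- ===== SOURCE A (Python) =====
-- def parse(lines):
--     heads = list()
--     tails = list()
--     map = list()
--     for i, l in enumerate(lines):
--         hs = list()
--         for j, h in enumerate(list(l)):
--             hs.append(int(h) if h != "." else 100)
--             if h == "0":
--                 heads.append((i, j))
--             elif h == "9":
--                 tails.append((i, j))
--         map.append(hs)
--     return (map, heads, tails)
-- ===== SOURCE B (Python) =====
-- def parse(lines):
--     grid = [[100 if h == "." else int(h) for h in l] for l in lines]
--     idx = {}
--     for i, row in enumerate(grid):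
--         for j, v in enumerate(row):
--             idx.setdefault(v, []).append((i, j))
--     return (grid, idx.get(0, []), idx.get(9, []))
-- ===== Notes on version B (the rewrite author's own statement) =====
-- stated objective: alternative
-- what changed: Instead of A's fused char pass with three accumulators, B builds the integer grid, then builds a positions-by-value dictionary index (value -> list of (i,j)) over the grid, and obtains heads and tails as the index lookups for 0 and 9.
import Mathlib
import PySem

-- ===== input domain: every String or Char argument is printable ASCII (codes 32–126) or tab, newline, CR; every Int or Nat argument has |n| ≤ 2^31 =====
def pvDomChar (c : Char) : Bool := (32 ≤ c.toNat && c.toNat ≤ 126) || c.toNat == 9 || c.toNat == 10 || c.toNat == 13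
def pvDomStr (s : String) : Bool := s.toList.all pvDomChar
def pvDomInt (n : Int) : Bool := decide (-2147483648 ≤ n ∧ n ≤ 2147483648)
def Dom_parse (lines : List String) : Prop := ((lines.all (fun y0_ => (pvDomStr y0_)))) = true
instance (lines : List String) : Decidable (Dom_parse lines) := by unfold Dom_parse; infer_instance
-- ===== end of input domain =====

-- B replaces A's fused char pass (three accumulators) by: build the integer grid, then build a
-- positions-by-value dictionary index over it, and read heads/tails off as the lookups for 0 and 9.

-- int(h) for a single char, total-defaulted: exact for '0'..'9'; on any other admitted (ASCII)
-- character Python's int() raises ValueError, and such inputs are excluded by Pre_parse below.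
def pvIntOfDigit (h : Char) : Int :=
  if '0' ≤ h ∧ h ≤ '9' then (h.toNat : Int) - 48 else 100

-- ===== PORT A =====
-- transliteration of `int(h) if h != "." else 100`
def pvConvA (h : Char) : Int := if h ≠ '.' then pvIntOfDigit h else 100

def parseRowA (i : Int) (cs : List (Int × Char)) (hs : List Int)
    (heads tails : List (Int × Int)) : List Int × List (Int × Int) × List (Int × Int) :=
  match cs with
  | [] => (hs, heads, tails)
  | (j, h) :: rest =>
      if h = '0' then parseRowA i rest (hs ++ [pvConvA h]) (heads ++ [(i, j)]) tails
      else if h = '9' then parseRowA i rest (hs ++ [pvConvA h]) heads (tails ++ [(i, j)])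
      else parseRowA i rest (hs ++ [pvConvA h]) heads tails

def parseLinesA (ls : List (Int × String)) (map : List (List Int))
    (heads tails : List (Int × Int)) : List (List Int) × List (Int × Int) × List (Int × Int) :=
  match ls with
  | [] => (map, heads, tails)
  | (i, l) :: rest =>
      match parseRowA i (PySem.List.enumerate l.toList) [] heads tails with
      | (hs, heads', tails') => parseLinesA rest (map ++ [hs]) heads' tails'

def parse (lines : List String) : List (List Int) × (List (Int × Int)) × (List (Int × Int)) :=
  parseLinesA (PySem.List.enumerate lines) [] [] []

-- ===== PORT B =====
-- transliteration of `100 if h == "." else int(h)`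
def pvConvB (h : Char) : Int := if h = '.' then 100 else pvIntOfDigit h

-- idx.setdefault(v, []).append((i, j))  ==  idx[v] = idx.get(v, []) + [(i, j)]
def buildIdxB (rows : List (Int × List Int)) (d : PySem.Dict Int (List (Int × Int))) :
    PySem.Dict Int (List (Int × Int)) :=
  match rows with
  | [] => d
  | (i, row) :: rest =>
      buildIdxB rest
        ((PySem.List.enumerate row).foldl
          (fun d jv => d.modify jv.2 [] (· ++ [(i, jv.1)])) d)

def parse_alt (lines : List String) : List (List Int) × (List (Int × Int)) × (List (Int × Int)) :=
  let grid := lines.map (fun l => l.toList.map pvConvB)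
  let idx := buildIdxB (PySem.List.enumerate grid) PySem.Dict.empty
  (grid, idx.getD 0 [], idx.getD 9 [])

-- ===== PRECONDITION & SPEC =====
-- Pre_parse: every character is a decimal digit or '.'. Within Dom (printable-ASCII input) this
-- excludes exactly the inputs where A raises: int(h) raises ValueError on every other such char.
def Pre_parse (lines : List String) : Prop :=
  (lines.all (fun l => l.toList.all (fun h => h == '.' || ('0' ≤ h && h ≤ '9')))) = true
instance (lines : List String) : Decidable (Pre_parse lines) := by unfold Pre_parse; infer_instance

def pvWitness_parse : List String := ["09."]

def Spec_parse (lines : List String) (out : List (List Int) × (List (Int × Int)) × (List (Int × Int))) : Prop := out = parse_alt lines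
instance (lines : List String) (out : List (List Int) × (List (Int × Int)) × (List (Int × Int))) : Decidable (Spec_parse lines out) := by unfold Spec_parse; infer_instance

-- ===== CLAIM =====
def Claim_equal_parse : Prop := ∀ (lines : List String), Dom_parse lines → Pre_parse lines → Spec_parse lines (parse lines)

-- ===== LEMMAS AND PROOFS =====

theorem convB_eq_convA : pvConvB = pvConvA := by
  funext h; unfold pvConvA pvConvB
  by_cases hd : h = '.' <;> simp [hd]

theorem convA_eq_zero (h : Char) : pvConvA h = 0 ↔ h = '0' := by
  unfold pvConvA pvIntOfDigit
  by_cases hd : h = '.'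
  · subst hd; decide
  · simp only [hd, ne_eq, not_false_iff, if_true]
    by_cases hdig : '0' ≤ h ∧ h ≤ '9'
    · rw [if_pos hdig]
      constructor
      · intro hv
        have h48 : h.toNat = 48 := by omega
        exact Char.ext (UInt32.toNat_inj.mp
          (show Char.toNat h = Char.toNat '0' from by rw [h48]; rfl))
      · intro hv; subst hv; decide
    · rw [if_neg hdig]
      constructor
      · intro hv; exact absurd hv (by decide)
      · intro hv; subst hv; exact absurd (by decide) hdig

theorem convA_eq_nine (h : Char) : pvConvA h = 9 ↔ h = '9' := by
  unfold pvConvA pvIntOfDigit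
  by_cases hd : h = '.'
  · subst hd; decide
  · simp only [hd, ne_eq, not_false_iff, if_true]
    by_cases hdig : '0' ≤ h ∧ h ≤ '9'
    · rw [if_pos hdig]
      constructor
      · intro hv
        have h57 : h.toNat = 57 := by omega
        exact Char.ext (UInt32.toNat_inj.mp
          (show Char.toNat h = Char.toNat '9' from by rw [h57]; rfl))
      · intro hv; subst hv; decide
    · rw [if_neg hdig]
      constructor
      · intro hv; exact absurd hv (by decide)
      · intro hv; subst hv; exact absurd (by decide) hdig

-- positions-with-value lists, the common denominator of both sides
def pvZeros (i : Int) (cs : List (Int × Char)) : List (Int × Int) :=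
  (cs.filter (fun jh => jh.2 = '0')).map (fun jh => (i, jh.1))
def pvNines (i : Int) (cs : List (Int × Char)) : List (Int × Int) :=
  (cs.filter (fun jh => jh.2 = '9')).map (fun jh => (i, jh.1))

theorem rowA_eq (i : Int) : ∀ (cs : List (Int × Char)) (hs : List Int)
    (heads tails : List (Int × Int)),
    parseRowA i cs hs heads tails =
      (hs ++ cs.map (fun jh => pvConvA jh.2), heads ++ pvZeros i cs, tails ++ pvNines i cs) := by
  intro cs
  induction cs with
  | nil => intro hs heads tails; simp [parseRowA, pvZeros, pvNines]
  | cons jh rest ih =>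
      intro hs heads tails
      obtain ⟨j, h⟩ := jh
      simp only [parseRowA]
      by_cases h0 : h = '0'
      · rw [if_pos h0, ih]; simp [pvZeros, pvNines, h0]
      · rw [if_neg h0]
        by_cases h9 : h = '9'
        · rw [if_pos h9, ih]; simp [pvZeros, pvNines, h9]
        · rw [if_neg h9, ih]; simp [pvZeros, pvNines, h0, h9]

theorem map_snd_f_enumerate {α β : Type} (f : α → β) : ∀ (xs : List α) (s : Int),
    (PySem.List.enumerate xs s).map (fun p => f p.2) = xs.map f := by
  intro xs
  induction xs with
  | nil => intro s; simp [PySem.List.enumerate_nil]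
  | cons x rest ih => intro s; simp [PySem.List.enumerate_cons, ih]

def pvHeadsA (ls : List (Int × String)) : List (Int × Int) :=
  ls.flatMap (fun il => pvZeros il.1 (PySem.List.enumerate il.2.toList))
def pvTailsA (ls : List (Int × String)) : List (Int × Int) :=
  ls.flatMap (fun il => pvNines il.1 (PySem.List.enumerate il.2.toList))

theorem linesA_eq : ∀ (ls : List (Int × String)) (map : List (List Int))
    (heads tails : List (Int × Int)),
    parseLinesA ls map heads tails =
      (map ++ ls.map (fun il => il.2.toList.map pvConvA),
       heads ++ pvHeadsA ls, tails ++ pvTailsA ls) := by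
  intro ls
  induction ls with
  | nil => intro map heads tails; simp [parseLinesA, pvHeadsA, pvTailsA]
  | cons il rest ih =>
      intro map heads tails
      obtain ⟨i, l⟩ := il
      simp only [parseLinesA, rowA_eq, ih, map_snd_f_enumerate, pvHeadsA, pvTailsA,
        List.flatMap_cons, List.map_cons, List.nil_append, List.append_assoc,
        List.cons_append]

-- B's nested dict loop, peeled into a single fold over the flattened (value, pos) pairs
def pvPairs (rows : List (Int × List Int)) : List (Int × (Int × Int)) :=
  rows.flatMap (fun ir => (PySem.List.enumerate ir.2).map (fun jv => (jv.2, (ir.1, jv.1))))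

theorem buildIdxB_eq : ∀ (rows : List (Int × List Int)) (d : PySem.Dict Int (List (Int × Int))),
    buildIdxB rows d = (pvPairs rows).foldl (fun d p => d.modify p.1 [] (· ++ [p.2])) d := by
  intro rows
  induction rows with
  | nil => intro d; simp [buildIdxB, pvPairs]
  | cons ir rest ih =>
      intro d
      obtain ⟨i, row⟩ := ir
      simp only [buildIdxB, pvPairs, List.flatMap_cons, List.foldl_append, ih, List.foldl_map]

theorem buildIdxB_getD (rows : List (Int × List Int)) (c : Int) :
    (buildIdxB rows PySem.Dict.empty).getD c [] =
      ((pvPairs rows).filter (fun p => p.1 == c)).map (·.2) := by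
  rw [buildIdxB_eq, PySem.Dict.getD_foldl_modify_append]
  simp [PySem.Dict.getD_empty]

theorem row_pairs_zero (i : Int) : ∀ (cs : List Char) (s : Int),
    (((PySem.List.enumerate (cs.map pvConvA) s).map (fun jv => (jv.2, (i, jv.1)))).filter
        (fun p => p.1 == 0)).map (·.2) = pvZeros i (PySem.List.enumerate cs s) := by
  intro cs
  induction cs with
  | nil => intro s; simp [PySem.List.enumerate_nil, pvZeros]
  | cons c rest ih =>
      intro s
      simp only [List.map_cons, PySem.List.enumerate_cons, List.filter_cons, pvZeros]
      by_cases hc : c = '0'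
      · subst hc
        rw [if_pos (show (pvConvA '0' == (0 : Int)) = true by decide)]
        have := ih (s + 1); simp only [pvZeros] at this
        simp [this]
      · have hb : ¬((pvConvA c == (0 : Int)) = true) := by
          simp only [beq_iff_eq]; exact fun hv => hc ((convA_eq_zero c).mp hv)
        rw [if_neg hb]
        have := ih (s + 1); simp only [pvZeros] at this
        simp [this, hc]

theorem row_pairs_nine (i : Int) : ∀ (cs : List Char) (s : Int),
    (((PySem.List.enumerate (cs.map pvConvA) s).map (fun jv => (jv.2, (i, jv.1)))).filter
        (fun p => p.1 == 9)).map (·.2) = pvNines i (PySem.List.enumerate cs s) := by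
  intro cs
  induction cs with
  | nil => intro s; simp [PySem.List.enumerate_nil, pvNines]
  | cons c rest ih =>
      intro s
      simp only [List.map_cons, PySem.List.enumerate_cons, List.filter_cons, pvNines]
      by_cases hc : c = '9'
      · subst hc
        rw [if_pos (show (pvConvA '9' == (9 : Int)) = true by decide)]
        have := ih (s + 1); simp only [pvNines] at this
        simp [this]
      · have hb : ¬((pvConvA c == (9 : Int)) = true) := by
          simp only [beq_iff_eq]; exact fun hv => hc ((convA_eq_nine c).mp hv)
        rw [if_neg hb]
        have := ih (s + 1); simp only [pvNines] at this
        simp [this, hc]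

theorem map_rowconv_enumerate : ∀ (xs : List String) (s : Int),
    (PySem.List.enumerate xs s).map (fun il => il.2.toList.map pvConvA) =
      xs.map (fun l => l.toList.map pvConvA) := by
  intro xs
  induction xs with
  | nil => intro s; simp [PySem.List.enumerate_nil]
  | cons x rest ih => intro s; simp [PySem.List.enumerate_cons, ih]

theorem pairs_filter_zero : ∀ (lines : List String) (s : Int),
    ((pvPairs (PySem.List.enumerate (lines.map (fun l => l.toList.map pvConvA)) s)).filter
        (fun p => p.1 == 0)).map (·.2) = pvHeadsA (PySem.List.enumerate lines s) := by
  intro lines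
  induction lines with
  | nil => intro s; simp [PySem.List.enumerate_nil, pvPairs, pvHeadsA]
  | cons l rest ih =>
      intro s
      simp only [List.map_cons, PySem.List.enumerate_cons, pvPairs, pvHeadsA,
        List.flatMap_cons, List.filter_append, List.map_append]
      rw [row_pairs_zero]
      have := ih (s + 1); simp only [pvPairs, pvHeadsA] at this
      rw [this]

theorem pairs_filter_nine : ∀ (lines : List String) (s : Int),
    ((pvPairs (PySem.List.enumerate (lines.map (fun l => l.toList.map pvConvA)) s)).filter
        (fun p => p.1 == 9)).map (·.2) = pvTailsA (PySem.List.enumerate lines s) := by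
  intro lines
  induction lines with
  | nil => intro s; simp [PySem.List.enumerate_nil, pvPairs, pvTailsA]
  | cons l rest ih =>
      intro s
      simp only [List.map_cons, PySem.List.enumerate_cons, pvPairs, pvTailsA,
        List.flatMap_cons, List.filter_append, List.map_append]
      rw [row_pairs_nine]
      have := ih (s + 1); simp only [pvPairs, pvTailsA] at this
      rw [this]

-- ===== VERDICT =====
theorem parse_spec : Claim_equal_parse := by
  intro lines _ _
  unfold Spec_parse parse
  simp only [parse_alt]
  rw [convB_eq_convA, linesA_eq, buildIdxB_getD, buildIdxB_getD,
    pairs_filter_zero, pairs_filter_nine]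
  simp [map_rowconv_enumerate]
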